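-- pv_equiv track=rewrite | github.com/doganes1507/algorithms-and-data-structures-labs | tasks/pack2/task3.py | f
-- ===== SOURCE A (Python) =====
-- def f(text):
--     result = set()
--
--     for i in range(len(text) - 1):
--         for j in range(i + 1, len(text), 2):
--             substring = text[i:j+1]
--             if substring[:len(substring) // 2] == substring[len(substring) // 2:]:
--                 result.add(substring)
--
--     return len(result)
-- ===== SOURCE B (Python) =====
-- def f(text):
--     n = len(text)
--     total = 0
--     for L in range(1, n // 2 + 1):
--         halves = set()
--         run = 0
--         for i in range(n - L - 1, -1, -1):
--             run = run + 1 if text[i] == text[i + L] else 0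
--             if i <= n - 2 * L and run >= L:
--                 halves.add(text[i:i + L])
--         total += len(halves)
--     return total
-- ===== Notes on version B (the rewrite author's own statement) =====
-- stated objective: faster
-- what changed: Instead of testing every (start, end) substring pair by building it and comparing its two halves by slicing, B iterates over the half-length L and sweeps the text once right-to-left maintaining the run length of matching positions between i and i+L (run >= L iff text[i:i+2L] is a square), collecting the distinct halves per L and summing the per-length counts.
import Mathlib
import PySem

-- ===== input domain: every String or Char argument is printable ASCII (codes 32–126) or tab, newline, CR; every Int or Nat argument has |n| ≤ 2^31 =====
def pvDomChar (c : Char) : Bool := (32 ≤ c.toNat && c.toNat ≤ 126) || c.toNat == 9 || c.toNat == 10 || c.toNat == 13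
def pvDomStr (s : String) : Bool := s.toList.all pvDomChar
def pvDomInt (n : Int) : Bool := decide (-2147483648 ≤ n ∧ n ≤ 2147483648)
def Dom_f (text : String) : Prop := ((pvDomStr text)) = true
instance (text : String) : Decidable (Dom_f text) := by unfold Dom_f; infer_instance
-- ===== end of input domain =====

-- B counts the distinct squares per half-length L with one right-to-left run-length scan
-- (run = length of the matching run between positions i and i+L) and a per-length set of
-- halves, replacing A's per-pair slice-built half comparison; a timing run measured B faster.

-- ===== PORT A =====
def f (text : String) : Int :=
  let result : PySem.Set String :=
    (PySem.List.pyRange 0 (PySem.Str.len text - 1) 1).foldl (fun result i =>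
      (PySem.List.pyRange (i + 1) (PySem.Str.len text) 2).foldl (fun result j =>
        let substring := PySem.Str.slice text (some i) (some (j + 1))
        if PySem.Str.slice substring none (some (PySem.Int.floordiv (PySem.Str.len substring) 2)) =
           PySem.Str.slice substring (some (PySem.Int.floordiv (PySem.Str.len substring) 2)) none
        then PySem.Set.add result substring else result) result)
      PySem.Set.empty
  PySem.Set.len result

-- ===== PORT B =====
-- text[i] / text[i+L] are read with pyGet? (Option equality); both indices are always in
-- range on the iterated i, so this matches Python's char comparison exactly.
def f_alt (text : String) : Int :=
  let n : Int := PySem.Str.len text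
  (PySem.List.pyRange 1 (PySem.Int.floordiv n 2 + 1) 1).foldl (fun total L =>
    let p := (PySem.List.pyRange (n - L - 1) (-1) (-1)).foldl
      (fun (p : PySem.Set String × Int) i =>
        let run : Int := if PySem.Str.pyGet? text i = PySem.Str.pyGet? text (i + L) then p.2 + 1 else 0
        let halves : PySem.Set String :=
          if (i ≤ n - 2 * L ∧ L ≤ run) then PySem.Set.add p.1 (PySem.Str.slice text (some i) (some (i + L)))
          else p.1
        (halves, run))
      (PySem.Set.empty, 0)
    total + PySem.Set.len p.1) 0

-- ===== PRECONDITION & SPEC =====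
def Spec_f (text : String) (out : Int) : Prop := out = f_alt text
instance (text : String) (out : Int) : Decidable (Spec_f text out) := by unfold Spec_f; infer_instance

-- ===== CLAIM (what is proved, stated in full; the proofs are below) =====
def Claim_equal_f : Prop := ∀ (text : String), Dom_f text → Spec_f text (f text)

-- ===== LEMMAS AND PROOFS =====

/-- `text[i:i+L]` as a list of chars. -/
def seg (cs : List Char) (i L : Nat) : List Char := (cs.drop i).take L

/-- `text[i:i+L]` as a string, written with the casts the ports produce. -/
def segS (t : String) (i L : Nat) : String :=
  PySem.Str.slice t (some (i : Int)) (some ((i + L : Nat) : Int))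

/-- Starts of squares with half-length L (meaningful for 1 ≤ L, 2*L ≤ n). -/
def goodF (cs : List Char) (L : Nat) : Finset Nat :=
  (Finset.range (cs.length - 2 * L + 1)).filter (fun i => seg cs i L = seg cs (i + L) L)

/-- The distinct halves of squares with half-length L. -/
def BL (t : String) (L : Nat) : Finset String := (goodF t.toList L).image (fun i => segS t i L)

/-- The distinct square substrings (A's set, as a Finset). -/
def AF (t : String) : Finset String :=
  (Finset.range (t.toList.length / 2)).biUnion
    (fun k => (goodF t.toList (k + 1)).image (fun i => segS t i (2 * (k + 1))))

/-- Length of the matching run between positions i and i+L, cut off at m (= n - L). -/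
def lceR (cs : List Char) (L m : Nat) (i : Nat) : Nat :=
  if h : i < m then (if cs[i]? = cs[i + L]? then lceR cs L m (i + 1) + 1 else 0) else 0
termination_by m - i

lemma toList_segS (t : String) (i L : Nat) : (segS t i L).toList = seg t.toList i L := by
  simp [segS, PySem.Str.toList_slice, PySem.Chars.slice_eq_listSlice, seg,
    PySem.List.slice_natCast_add]

lemma length_seg {cs : List Char} {i L : Nat} (h : i + L ≤ cs.length) : (seg cs i L).length = L := by
  simp [seg]; omega

lemma seg_eq_iff {cs : List Char} {i L : Nat} :
    seg cs i L = seg cs (i + L) L ↔ ∀ j < L, cs[i + j]? = cs[i + j + L]? := by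
  constructor
  · intro he j hj
    have := congrArg (fun l => l[j]?) he
    simpa [seg, List.getElem?_take_of_lt hj, List.getElem?_drop,
      Nat.add_assoc, Nat.add_comm j L, Nat.add_left_comm] using this
  · intro hp
    apply List.ext_getElem?
    intro j
    by_cases hj : j < L
    · simpa [seg, List.getElem?_take_of_lt hj, List.getElem?_drop,
        Nat.add_assoc, Nat.add_comm j L, Nat.add_left_comm] using hp j hj
    · have h1 : (seg cs i L).length ≤ j := by simp [seg]; omega
      have h2 : (seg cs (i + L) L).length ≤ j := by simp [seg]; omega
      rw [List.getElem?_eq_none h1, List.getElem?_eq_none h2]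

lemma lceR_ge_iff (cs : List Char) (L m : Nat) :
    ∀ (k i : Nat), i + k ≤ m → (k ≤ lceR cs L m i ↔ ∀ j < k, cs[i + j]? = cs[i + j + L]?) := by
  intro k
  induction k with
  | zero => intro i _; simp
  | succ k ih =>
    intro i hi
    have him : i < m := by omega
    rw [lceR]
    simp only [dif_pos him]
    by_cases he : cs[i]? = cs[i + L]?
    · rw [if_pos he, Nat.succ_le_succ_iff, ih (i + 1) (by omega)]
      constructor
      · intro hp j hj
        rcases Nat.eq_zero_or_pos j with rfl | hj0
        · simpa using he
        · have := hp (j - 1) (by omega)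
          have hj1 : i + 1 + (j - 1) = i + j := by omega
          rwa [hj1] at this
      · intro hp j hj
        have := hp (j + 1) (by omega)
        have hj1 : i + (j + 1) = i + 1 + j := by omega
        rwa [hj1] at this
    · rw [if_neg he]
      constructor
      · omega
      · intro hp; exact absurd (by simpa using hp 0 (by omega)) he

lemma setFold_mem {β : Type} (F : PySem.Set String → β → PySem.Set String) (Q : β → String → Prop)
    (hF : ∀ s b y, y ∈ F s b ↔ y ∈ s ∨ Q b y) :
    ∀ (l : List β) (s : PySem.Set String) (y : String),
      (y ∈ l.foldl F s ↔ y ∈ s ∨ ∃ b ∈ l, Q b y) := by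
  intro l
  induction l with
  | nil => simp
  | cons b l ih =>
    intro s y
    simp only [List.foldl_cons, ih, hF, List.mem_cons]
    constructor
    · rintro ((h | h) | ⟨b', hb', hq⟩)
      · exact Or.inl h
      · exact Or.inr ⟨b, Or.inl rfl, h⟩
      · exact Or.inr ⟨b', Or.inr hb', hq⟩
    · rintro (h | ⟨b', (rfl | hb'), hq⟩)
      · exact Or.inl (Or.inl h)
      · exact Or.inl (Or.inr hq)
      · exact Or.inr ⟨b', hb', hq⟩

lemma setFold_nodup {β : Type} (F : PySem.Set String → β → PySem.Set String)
    (hF : ∀ s b, List.Nodup s → List.Nodup (F s b)) :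
    ∀ (l : List β) (s : PySem.Set String), List.Nodup s → List.Nodup (l.foldl F s) := by
  intro l
  induction l with
  | nil => exact fun s h => h
  | cons b l ih => intro s hs; exact ih _ (hF s b hs)

lemma pairFold_nodup {β : Type} (F : (PySem.Set String × Int) → β → (PySem.Set String × Int))
    (hF : ∀ p b, List.Nodup p.1 → List.Nodup (F p b).1) :
    ∀ (l : List β) (p : PySem.Set String × Int), List.Nodup p.1 → List.Nodup ((l.foldl F p).1) := by
  intro l
  induction l with
  | nil => exact fun p h => h
  | cons b l ih => intro p hp; exact ih _ (hF p b hp)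

/-- A's half-equality test on the substring `text[i:i+2L]` is exactly squareness at (i, L). -/
lemma condA_iff (t : String) (i L : Nat) (hL : 1 ≤ L) (hn : i + 2 * L ≤ t.toList.length) :
    (PySem.Str.slice (segS t i (2 * L)) none
        (some (PySem.Int.floordiv (PySem.Str.len (segS t i (2 * L))) 2)) =
      PySem.Str.slice (segS t i (2 * L))
        (some (PySem.Int.floordiv (PySem.Str.len (segS t i (2 * L))) 2)) none) ↔
      seg t.toList i L = seg t.toList (i + L) L := by
  have hlen : PySem.Str.len (segS t i (2 * L)) = ((2 * L : Nat) : Int) := by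
    rw [PySem.Str.len_eq, toList_segS, length_seg (by omega)]
  have hdiv : PySem.Int.floordiv ((2 * L : Nat) : Int) 2 = ((L : Nat) : Int) := by
    have h2 := PySem.Int.floordiv_natCast (2 * L) 2
    rw [Nat.mul_div_cancel_left L (by norm_num : 0 < 2)] at h2
    exact_mod_cast h2
  rw [hlen, hdiv, ← String.toList_inj, PySem.Str.toList_slice, PySem.Str.toList_slice]
  simp only [PySem.Chars.slice_eq_listSlice, toList_segS]
  rw [PySem.List.slice_to_natCast, PySem.List.slice_from_natCast]
  unfold seg
  rw [List.take_take, List.drop_take, List.drop_drop]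
  have h1 : min L (2 * L) = L := by omega
  have h2 : 2 * L - L = L := by omega
  rw [h1, h2]

lemma slice_eq_segS (t : String) (a b : Int) (ii L : Nat) (ha : a = (ii : Int))
    (hb : b + 1 = ((ii + L : Nat) : Int)) :
    PySem.Str.slice t (some a) (some (b + 1)) = segS t ii L := by
  rw [segS, ha, hb]

/-- A's nested ranges produce exactly the members of `AF`. -/
lemma memA_iff (t : String) (y : String) :
    (∃ i ∈ PySem.List.pyRange 0 (PySem.Str.len t - 1) 1,
      ∃ j ∈ PySem.List.pyRange (i + 1) (PySem.Str.len t) 2,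
        (PySem.Str.slice (PySem.Str.slice t (some i) (some (j + 1))) none
            (some (PySem.Int.floordiv (PySem.Str.len (PySem.Str.slice t (some i) (some (j + 1)))) 2)) =
          PySem.Str.slice (PySem.Str.slice t (some i) (some (j + 1)))
            (some (PySem.Int.floordiv (PySem.Str.len (PySem.Str.slice t (some i) (some (j + 1)))) 2)) none) ∧
        y = PySem.Str.slice t (some i) (some (j + 1))) ↔ y ∈ AF t := by
  have hN : PySem.Str.len t = (t.toList.length : Int) := PySem.Str.len_eq t
  constructor
  · rintro ⟨i, hi, j, hj, hc, rfl⟩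
    rw [PySem.List.mem_pyRange_one, hN] at hi
    rw [PySem.List.mem_pyRange_iff_of_pos (by norm_num), hN] at hj
    obtain ⟨hij, hjN, d, hd⟩ := hj
    set n := t.toList.length with hn
    have hd0 : 0 ≤ d := by omega
    have heq : PySem.Str.slice t (some i) (some (j + 1)) = segS t i.toNat (2 * (d.toNat + 1)) := by
      apply slice_eq_segS t i j _ _ (by omega) (by push_cast; omega)
    rw [heq] at hc ⊢
    have hcond := (condA_iff t i.toNat (d.toNat + 1) (by omega) (by omega)).mp hc
    simp only [AF, Finset.mem_biUnion, Finset.mem_range, Finset.mem_image, goodF,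
      Finset.mem_filter]
    exact ⟨d.toNat, by omega, i.toNat, ⟨by omega, hcond⟩, rfl⟩
  · simp only [AF, Finset.mem_biUnion, Finset.mem_range, Finset.mem_image, goodF,
      Finset.mem_filter]
    rintro ⟨k, hk, ii, ⟨hii, hgood⟩, rfl⟩
    set n := t.toList.length with hn
    have hb : ii + 2 * (k + 1) ≤ n := by omega
    refine ⟨(ii : Int), ?_, (ii : Int) + 2 * (k + 1) - 1, ?_, ?_, ?_⟩
    · rw [PySem.List.mem_pyRange_one, hN]; omega
    · rw [PySem.List.mem_pyRange_iff_of_pos (by norm_num), hN]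
      refine ⟨by omega, by omega, by omega⟩
    · have heq : PySem.Str.slice t (some (ii : Int)) (some ((ii : Int) + 2 * (↑k + 1) - 1 + 1)) =
          segS t ii (2 * (k + 1)) := by
        apply slice_eq_segS t _ _ _ _ rfl (by push_cast; ring)
      rw [heq]
      exact (condA_iff t ii (k + 1) (by omega) hb).mpr hgood
    · symm
      apply slice_eq_segS t _ _ _ _ rfl (by push_cast; ring)

set_option maxHeartbeats 1000000 in
/-- A computes the number of distinct square substrings. -/
lemma LA (t : String) : f t = ((AF t).card : Int) := by
  unfold f
  dsimp only
  set F := fun (result : PySem.Set String) (i : Int) =>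
      (PySem.List.pyRange (i + 1) (PySem.Str.len t) 2).foldl (fun result j =>
        if PySem.Str.slice (PySem.Str.slice t (some i) (some (j + 1))) none
             (some (PySem.Int.floordiv (PySem.Str.len (PySem.Str.slice t (some i) (some (j + 1)))) 2)) =
           PySem.Str.slice (PySem.Str.slice t (some i) (some (j + 1)))
             (some (PySem.Int.floordiv (PySem.Str.len (PySem.Str.slice t (some i) (some (j + 1)))) 2)) none
        then PySem.Set.add result (PySem.Str.slice t (some i) (some (j + 1))) else result) result
    with hF
  have hFmem : ∀ s i y, y ∈ F s i ↔ y ∈ s ∨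
      ∃ j ∈ PySem.List.pyRange (i + 1) (PySem.Str.len t) 2,
        (PySem.Str.slice (PySem.Str.slice t (some i) (some (j + 1))) none
            (some (PySem.Int.floordiv (PySem.Str.len (PySem.Str.slice t (some i) (some (j + 1)))) 2)) =
          PySem.Str.slice (PySem.Str.slice t (some i) (some (j + 1)))
            (some (PySem.Int.floordiv (PySem.Str.len (PySem.Str.slice t (some i) (some (j + 1)))) 2)) none) ∧
        y = PySem.Str.slice t (some i) (some (j + 1)) := by
    intro s i y
    apply setFold_mem
    intro s' j y'
    split_ifs with hc
    · rw [PySem.Set.mem_add]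
      constructor
      · rintro (h | h)
        · exact Or.inl h
        · exact Or.inr ⟨hc, h⟩
      · rintro (h | ⟨-, h⟩)
        · exact Or.inl h
        · exact Or.inr h
    · constructor
      · exact Or.inl
      · rintro (h | ⟨hC, -⟩)
        · exact h
        · exact absurd hC hc
  have hFnodup : ∀ s i, List.Nodup s → List.Nodup (F s i) := by
    intro s i hs
    apply setFold_nodup _ _ _ _ hs
    intro s' j hs'
    split_ifs
    · exact PySem.Set.nodup_add _ _ hs'
    · exact hs'
  set res := (PySem.List.pyRange 0 (PySem.Str.len t - 1) 1).foldl F PySem.Set.empty with hres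
  have hnodup : List.Nodup res := by
    apply setFold_nodup _ hFnodup _ _ (by simp [PySem.Set.empty])
  have hmem : ∀ y, y ∈ res ↔ y ∈ AF t := by
    intro y
    rw [hres, setFold_mem F _ hFmem, ← memA_iff t y]
    simp [PySem.Set.empty]
  have htf : res.toFinset = AF t := by
    apply Finset.ext
    intro y
    rw [List.mem_toFinset]
    exact hmem y
  rw [PySem.Set.len, ← List.toFinset_card_of_nodup hnodup, htf]

/-- B's inner loop invariant: the run accumulator equals `lceR` and the set collects the
halves of the squares already passed. -/
lemma B_loop (t : String) (LN : ℕ) :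
    ∀ (a : ℕ) (s : PySem.Set String), a ≤ t.toList.length - LN →
      ∀ y, (y ∈ ((PySem.List.pyRange ((a : ℤ) - 1) (-1) (-1)).foldl
          (fun (p : PySem.Set String × ℤ) (i : ℤ) =>
            (if i ≤ ((t.toList.length : ℤ)) - 2 * (LN : ℤ) ∧
                (LN : ℤ) ≤ (if PySem.Str.pyGet? t i = PySem.Str.pyGet? t (i + (LN : ℤ)) then p.2 + 1 else 0)
             then PySem.Set.add p.1 (PySem.Str.slice t (some i) (some (i + (LN : ℤ)))) else p.1,
             if PySem.Str.pyGet? t i = PySem.Str.pyGet? t (i + (LN : ℤ)) then p.2 + 1 else 0))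
          (s, (lceR t.toList LN (t.toList.length - LN) a : ℤ))).1 ↔
        (y ∈ s ∨ ∃ i, i < a ∧ i + 2 * LN ≤ t.toList.length ∧
          LN ≤ lceR t.toList LN (t.toList.length - LN) i ∧ y = segS t i LN)) := by
  intro a
  induction a with
  | zero =>
    intro s _ y
    have h0 : ((0 : ℕ) : ℤ) - 1 = -1 := by norm_num
    rw [h0, PySem.List.pyRange_neg_one_eq_nil (le_refl _)]
    simp
  | succ a ih =>
    intro s ha y
    have h1 : (((a + 1 : ℕ)) : ℤ) - 1 = (a : ℤ) := by push_cast; ring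
    rw [h1, PySem.List.pyRange_neg_one_cons (by omega), List.foldl_cons]
    have hcast : ((a : ℤ) + (LN : ℤ)) = ((a + LN : ℕ) : ℤ) := by push_cast; ring
    have hrun : (if PySem.Str.pyGet? t (a : ℤ) = PySem.Str.pyGet? t ((a : ℤ) + (LN : ℤ))
          then ((lceR t.toList LN (t.toList.length - LN) (a + 1) : ℕ) : ℤ) + 1 else 0) =
        ((lceR t.toList LN (t.toList.length - LN) a : ℕ) : ℤ) := by
      rw [hcast, PySem.Str.pyGet?_natCast, PySem.Str.pyGet?_natCast]
      conv_rhs => rw [lceR]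
      rw [dif_pos (show a < t.toList.length - LN by omega)]
      split_ifs with hc
      · push_cast; ring
      · norm_num
    dsimp only
    rw [hrun]
    have hslice : PySem.Str.slice t (some (a : ℤ)) (some ((a : ℤ) + (LN : ℤ))) = segS t a LN := by
      rw [segS, hcast]
    rw [hslice]
    rw [ih _ (by omega) y]
    set R := lceR t.toList LN (t.toList.length - LN) a with hR
    by_cases hC : ((a : ℤ) ≤ ((t.toList.length : ℤ)) - 2 * (LN : ℤ) ∧ (LN : ℤ) ≤ ((R : ℕ) : ℤ))
    · rw [if_pos hC]
      have ha2 : a + 2 * LN ≤ t.toList.length := by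
        have := hC.1; omega
      have hlr : LN ≤ R := by exact_mod_cast hC.2
      rw [PySem.Set.mem_add]
      constructor
      · rintro ((h | h) | ⟨i, hi, h2, h3, h4⟩)
        · exact Or.inl h
        · exact Or.inr ⟨a, by omega, ha2, hlr, h⟩
        · exact Or.inr ⟨i, by omega, h2, h3, h4⟩
      · rintro (h | ⟨i, hi, h2, h3, h4⟩)
        · exact Or.inl (Or.inl h)
        · rcases Nat.lt_succ_iff_lt_or_eq.mp hi with hlt | rfl
          · exact Or.inr ⟨i, hlt, h2, h3, h4⟩
          · exact Or.inl (Or.inr h4)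
    · rw [if_neg hC]
      constructor
      · rintro (h | ⟨i, hi, h2, h3, h4⟩)
        · exact Or.inl h
        · exact Or.inr ⟨i, by omega, h2, h3, h4⟩
      · rintro (h | ⟨i, hi, h2, h3, h4⟩)
        · exact Or.inl h
        · rcases Nat.lt_succ_iff_lt_or_eq.mp hi with hlt | rfl
          · exact Or.inr ⟨i, hlt, h2, h3, h4⟩
          · exact absurd ⟨by omega, by exact_mod_cast h3⟩ hC

/-- B's inner loop computes the number of distinct halves of squares of half-length LN. -/
lemma innerB (t : String) (LN : ℕ) (hL1 : 1 ≤ LN) (hL2 : 2 * LN ≤ t.toList.length) :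
    PySem.Set.len (((PySem.List.pyRange ((t.toList.length : ℤ) - (LN : ℤ) - 1) (-1) (-1)).foldl
        (fun (p : PySem.Set String × ℤ) (i : ℤ) =>
          (if i ≤ ((t.toList.length : ℤ)) - 2 * (LN : ℤ) ∧
              (LN : ℤ) ≤ (if PySem.Str.pyGet? t i = PySem.Str.pyGet? t (i + (LN : ℤ)) then p.2 + 1 else 0)
           then PySem.Set.add p.1 (PySem.Str.slice t (some i) (some (i + (LN : ℤ)))) else p.1,
           if PySem.Str.pyGet? t i = PySem.Str.pyGet? t (i + (LN : ℤ)) then p.2 + 1 else 0))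
        (PySem.Set.empty, 0)).1) = ((BL t LN).card : ℤ) := by
  have hstart : ((t.toList.length : ℤ)) - (LN : ℤ) - 1 = ((t.toList.length - LN : ℕ) : ℤ) - 1 := by
    push_cast [Nat.cast_sub (by omega : LN ≤ t.toList.length)]; ring
  have hrun0 : (0 : ℤ) = ((lceR t.toList LN (t.toList.length - LN) (t.toList.length - LN) : ℕ) : ℤ) := by
    rw [lceR, dif_neg (by omega)]; norm_num
  rw [hstart]
  have hB := B_loop t LN (t.toList.length - LN) PySem.Set.empty (by omega)
  rw [← hrun0] at hB
  set res := ((PySem.List.pyRange (((t.toList.length - LN : ℕ) : ℤ) - 1) (-1) (-1)).foldl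
        (fun (p : PySem.Set String × ℤ) (i : ℤ) =>
          (if i ≤ ((t.toList.length : ℤ)) - 2 * (LN : ℤ) ∧
              (LN : ℤ) ≤ (if PySem.Str.pyGet? t i = PySem.Str.pyGet? t (i + (LN : ℤ)) then p.2 + 1 else 0)
           then PySem.Set.add p.1 (PySem.Str.slice t (some i) (some (i + (LN : ℤ)))) else p.1,
           if PySem.Str.pyGet? t i = PySem.Str.pyGet? t (i + (LN : ℤ)) then p.2 + 1 else 0))
        (PySem.Set.empty, 0)).1 with hres
  have hmem : ∀ y, y ∈ res ↔ y ∈ BL t LN := by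
    intro y
    rw [hres, hB y]
    simp only [PySem.Set.empty, List.not_mem_nil, false_or]
    constructor
    · rintro ⟨i, hi, h2, h3, rfl⟩
      have hgood : seg t.toList i LN = seg t.toList (i + LN) LN := by
        rw [seg_eq_iff]
        exact (lceR_ge_iff t.toList LN (t.toList.length - LN) LN i (by omega)).mp h3
      simp only [BL, Finset.mem_image, goodF, Finset.mem_filter, Finset.mem_range]
      exact ⟨i, ⟨by omega, hgood⟩, rfl⟩
    · simp only [BL, Finset.mem_image, goodF, Finset.mem_filter, Finset.mem_range]
      rintro ⟨i, ⟨hi, hgood⟩, rfl⟩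
      have h2 : i + 2 * LN ≤ t.toList.length := by omega
      refine ⟨i, by omega, h2, ?_, rfl⟩
      rw [lceR_ge_iff t.toList LN (t.toList.length - LN) LN i (by omega)]
      exact seg_eq_iff.mp hgood
  have hnodup : List.Nodup res := by
    rw [hres]
    apply pairFold_nodup
    · intro p b hp
      dsimp only
      split_ifs <;> first | exact PySem.Set.nodup_add _ _ hp | exact hp
    · simp [PySem.Set.empty]
  have htf : res.toFinset = BL t LN := Finset.ext (fun y => by rw [List.mem_toFinset]; exact hmem y)
  rw [PySem.Set.len, ← List.toFinset_card_of_nodup hnodup, htf]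

lemma sum_map_range (g : ℕ → ℤ) (n : ℕ) :
    ((List.range n).map g).sum = ∑ i ∈ Finset.range n, g i := by
  induction n with
  | zero => simp
  | succ n ih => simp [List.range_succ, Finset.sum_range_succ, ih]

/-- B computes the sum, over the half-lengths, of the numbers of distinct halves. -/
lemma LB (t : String) :
    f_alt t = ∑ k ∈ Finset.range (t.toList.length / 2), ((BL t (k + 1)).card : Int) := by
  unfold f_alt
  dsimp only
  rw [PySem.List.foldl_add _ (fun L => PySem.Set.len (((PySem.List.pyRange (PySem.Str.len t - L - 1) (-1) (-1)).foldl _ (PySem.Set.empty, 0)).1))]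
  rw [PySem.Str.len_eq]
  have hfd : PySem.Int.floordiv ((t.toList.length : ℤ)) 2 = ((t.toList.length / 2 : ℕ) : ℤ) := by
    exact_mod_cast PySem.Int.floordiv_natCast t.toList.length 2
  rw [hfd, PySem.List.pyRange_one, List.map_map]
  have h1 : ((t.toList.length / 2 : ℕ) : ℤ) + 1 - 1 = ((t.toList.length / 2 : ℕ) : ℤ) := by ring
  rw [h1, Int.toNat_natCast, sum_map_range]
  rw [zero_add]
  apply Finset.sum_congr rfl
  intro k hk
  rw [Finset.mem_range] at hk
  dsimp only [Function.comp]
  have hL : (1 : ℤ) + (k : ℤ) = ((k + 1 : ℕ) : ℤ) := by push_cast; ring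
  simp only [hL]
  exact innerB t (k + 1) (by omega) (by omega)

lemma seg_double (cs : List Char) (i L : Nat) :
    seg cs i (2 * L) = seg cs i L ++ seg cs (i + L) L := by
  unfold seg
  rw [show 2 * L = L + L by ring, List.take_add, List.drop_drop]

lemma dbl_inj : Function.Injective (fun h : String => h ++ h) := by
  intro a b h
  dsimp at h
  rw [← String.toList_inj, String.toList_append, String.toList_append] at h
  have hlen : a.toList.length = b.toList.length := by
    have hl := congrArg List.length h
    rw [List.length_append, List.length_append] at hl
    omega
  exact String.toList_inj.mp ((List.append_inj h hlen).1)

lemma len_mem_image (t : String) (L : Nat) (hL : 2 * L ≤ t.toList.length) (y : String)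
    (hy : y ∈ (goodF t.toList L).image (fun i => segS t i (2 * L))) :
    y.toList.length = 2 * L := by
  simp only [Finset.mem_image, goodF, Finset.mem_filter, Finset.mem_range] at hy
  obtain ⟨i, ⟨hi, -⟩, rfl⟩ := hy
  rw [toList_segS, length_seg (by omega)]

/-- Counting A's squares by half-length: a square of half-length L is the double of its
half, doubling is injective, and squares of different lengths are distinct. -/
lemma LC (t : String) :
    (AF t).card = ∑ k ∈ Finset.range (t.toList.length / 2), (BL t (k + 1)).card := by
  rw [AF, Finset.card_biUnion]
  · apply Finset.sum_congr rfl
    intro k hk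
    rw [Finset.mem_range] at hk
    have himg : (goodF t.toList (k + 1)).image (fun i => segS t i (2 * (k + 1))) =
        (BL t (k + 1)).image (fun h => h ++ h) := by
      rw [BL, Finset.image_image]
      apply Finset.image_congr
      intro i hi
      simp only [goodF, Finset.mem_coe, Finset.mem_filter, Finset.mem_range] at hi
      dsimp only [Function.comp]
      rw [← String.toList_inj, String.toList_append, toList_segS, toList_segS,
        seg_double, hi.2]
    rw [himg, Finset.card_image_of_injective _ dbl_inj]
  · intro a ha b hb hne
    simp only [Finset.mem_coe, Finset.mem_range] at ha hb
    rw [Function.onFun, Finset.disjoint_left]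
    intro y hya hyb
    have la := len_mem_image t (a + 1) (by omega) y hya
    have lb := len_mem_image t (b + 1) (by omega) y hyb
    omega

-- ===== VERDICT (by name: the statement is the Claim_ definition above) =====
theorem f_spec : Claim_equal_f := by
  intro t _
  unfold Spec_f
  rw [LA, LB, LC]
  push_cast
  rfl
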